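-- pv_equiv track=rewrite | github.com/gwesekolahan-creator/paradise-CRACK | PATRIOT.py | tahun
-- ===== SOURCE A (Python) =====
-- def tahun(fx: str) -> str:
--     """Perkirakan tahun pembuatan akun FB berdasarkan ID"""
--     if not fx:
--         return ""
--
--     prefix_map = {
--         '1000000000': '2009', '100000000': '2009',
--         '10000000': '2009', '1000000': '2009',
--         '1000006': '2010', '100001': '2010-2011',
--         '100002': '2011-2012', '100004': '2012-2013',
--         '100005': '2013-2014', '100007': '2014-2015',
--         '100009': '2015', '10001': '2015-2016',
--         '10002': '2016-2017', '10003': '2018',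
--         '10004': '2019', '10005': '2020',
--         '10006': '2021-2022',
--     }
--
--     if len(fx) == 15:
--         for k, v in prefix_map.items():
--             if fx.startswith(k):
--                 return v
--     elif len(fx) in (9, 10):
--         return '2008-2009'
--     elif len(fx) == 8:
--         return '2007-2008'
--     elif len(fx) == 7:
--         return '2006-2007'
--     return ""
-- ===== SOURCE B (Python) =====
-- # B: character-by-character decision tree (trie) — no prefix table, no startswith:
-- # every table prefix begins '1000', then single characters at positions 4, 5, 6 decide the year.
-- _Y5 = {'1': '2010-2011', '2': '2011-2012', '4': '2012-2013',
--        '5': '2013-2014', '7': '2014-2015', '9': '2015'}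
-- _Y4 = {'1': '2015-2016', '2': '2016-2017', '3': '2018',
--        '4': '2019', '5': '2020', '6': '2021-2022'}
--
-- def tahun(fx: str) -> str:
--     """Perkirakan tahun pembuatan akun FB berdasarkan ID"""
--     if not fx:
--         return ""
--     n = len(fx)
--     if n == 15:
--         if fx[:4] != '1000':
--             return ""
--         if fx[4:5] != '0':
--             return _Y4.get(fx[4:5], "")
--         if fx[5:6] != '0':
--             return _Y5.get(fx[5:6], "")
--         c6 = fx[6:7]
--         if c6 == '0':
--             return '2009'
--         if c6 == '6':
--             return '2010'
--         return ""
--     if n in (9, 10):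
--         return '2008-2009'
--     if n == 8:
--         return '2007-2008'
--     if n == 7:
--         return '2006-2007'
--     return ""
-- ===== Notes on version B (the rewrite author's own statement) =====
-- stated objective: alternative
-- what changed: Replaced A's linear first-match scan over the 17-entry prefix table (17 startswith tests) with a character-by-character decision tree: since every table prefix starts with '1000', B checks fx[:4] once and then branches on the single characters at positions 4, 5 and 6, with no prefix table at all.
import Mathlib
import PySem

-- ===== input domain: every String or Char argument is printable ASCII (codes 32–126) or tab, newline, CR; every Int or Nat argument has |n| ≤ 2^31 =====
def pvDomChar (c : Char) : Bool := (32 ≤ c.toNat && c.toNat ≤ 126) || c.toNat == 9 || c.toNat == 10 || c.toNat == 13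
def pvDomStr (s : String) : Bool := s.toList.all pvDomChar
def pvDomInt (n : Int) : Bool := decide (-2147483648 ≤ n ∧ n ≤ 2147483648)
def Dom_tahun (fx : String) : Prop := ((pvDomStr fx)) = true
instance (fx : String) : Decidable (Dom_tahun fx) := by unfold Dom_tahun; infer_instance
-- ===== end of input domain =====

-- B replaces A's linear startswith-scan over a 17-entry prefix table by a character-by-character
-- decision tree (every table prefix starts '1000'; the characters at positions 4, 5, 6 decide); same behaviour.

-- ===== PORT A =====
def tahunPrefixMap : List (String × String) :=
  [("1000000000", "2009"), ("100000000", "2009"),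
   ("10000000", "2009"), ("1000000", "2009"),
   ("1000006", "2010"), ("100001", "2010-2011"),
   ("100002", "2011-2012"), ("100004", "2012-2013"),
   ("100005", "2013-2014"), ("100007", "2014-2015"),
   ("100009", "2015"), ("10001", "2015-2016"),
   ("10002", "2016-2017"), ("10003", "2018"),
   ("10004", "2019"), ("10005", "2020"),
   ("10006", "2021-2022")]

-- the 'for k, v in prefix_map.items(): if fx.startswith(k): return v' loop (falls through to "")
def tahunScan (fx : String) : List (String × String) → String
  | [] => ""
  | (k, v) :: rest => if PySem.Str.startswith fx k then v else tahunScan fx rest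

def tahun (fx : String) : String :=
  if fx = "" then ""
  else if PySem.Str.len fx = 15 then tahunScan fx tahunPrefixMap
  else if PySem.Str.len fx = 9 ∨ PySem.Str.len fx = 10 then "2008-2009"
  else if PySem.Str.len fx = 8 then "2007-2008"
  else if PySem.Str.len fx = 7 then "2006-2007"
  else ""

-- ===== PORT B =====
def tahunY5 : PySem.Dict String String :=
  PySem.Dict.mk [("1", "2010-2011"), ("2", "2011-2012"), ("4", "2012-2013"),
                 ("5", "2013-2014"), ("7", "2014-2015"), ("9", "2015")]

def tahunY4 : PySem.Dict String String :=
  PySem.Dict.mk [("1", "2015-2016"), ("2", "2016-2017"), ("3", "2018"),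
                 ("4", "2019"), ("5", "2020"), ("6", "2021-2022")]

def tahun_alt (fx : String) : String :=
  if fx = "" then ""
  else if PySem.Str.len fx = 15 then
    -- character-by-character decision tree: every table prefix starts with '1000'
    if PySem.Str.slice fx none (some 4) ≠ "1000" then ""
    else if PySem.Str.slice fx (some 4) (some 5) ≠ "0" then
      tahunY4.getD (PySem.Str.slice fx (some 4) (some 5)) ""
    else if PySem.Str.slice fx (some 5) (some 6) ≠ "0" then
      tahunY5.getD (PySem.Str.slice fx (some 5) (some 6)) ""
    else if PySem.Str.slice fx (some 6) (some 7) = "0" then "2009"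
    else if PySem.Str.slice fx (some 6) (some 7) = "6" then "2010"
    else ""
  else if PySem.Str.len fx = 9 ∨ PySem.Str.len fx = 10 then "2008-2009"
  else if PySem.Str.len fx = 8 then "2007-2008"
  else if PySem.Str.len fx = 7 then "2006-2007"
  else ""

-- ===== PRECONDITION & SPEC =====
def Spec_tahun (fx : String) (out : String) : Prop := out = tahun_alt fx
instance (fx : String) (out : String) : Decidable (Spec_tahun fx out) := by unfold Spec_tahun; infer_instance

-- ===== CLAIM (what is proved, stated in full; the proofs are below) =====
def Claim_equal_tahun : Prop := ∀ (fx : String), Dom_tahun fx → Spec_tahun fx (tahun fx)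

-- ===== LEMMAS AND PROOFS =====

def treeA (a0 a1 a2 a3 a4 a5 a6 a7 a8 a9 : Char) : String :=
  if '1' = a0 ∧ '0' = a1 ∧ '0' = a2 ∧ '0' = a3 ∧ '0' = a4 ∧ '0' = a5 ∧ '0' = a6 ∧ '0' = a7 ∧ '0' = a8 ∧ '0' = a9 then "2009"
  else   if '1' = a0 ∧ '0' = a1 ∧ '0' = a2 ∧ '0' = a3 ∧ '0' = a4 ∧ '0' = a5 ∧ '0' = a6 ∧ '0' = a7 ∧ '0' = a8 then "2009"
  else   if '1' = a0 ∧ '0' = a1 ∧ '0' = a2 ∧ '0' = a3 ∧ '0' = a4 ∧ '0' = a5 ∧ '0' = a6 ∧ '0' = a7 then "2009"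
  else   if '1' = a0 ∧ '0' = a1 ∧ '0' = a2 ∧ '0' = a3 ∧ '0' = a4 ∧ '0' = a5 ∧ '0' = a6 then "2009"
  else   if '1' = a0 ∧ '0' = a1 ∧ '0' = a2 ∧ '0' = a3 ∧ '0' = a4 ∧ '0' = a5 ∧ '6' = a6 then "2010"
  else   if '1' = a0 ∧ '0' = a1 ∧ '0' = a2 ∧ '0' = a3 ∧ '0' = a4 ∧ '1' = a5 then "2010-2011"
  else   if '1' = a0 ∧ '0' = a1 ∧ '0' = a2 ∧ '0' = a3 ∧ '0' = a4 ∧ '2' = a5 then "2011-2012"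
  else   if '1' = a0 ∧ '0' = a1 ∧ '0' = a2 ∧ '0' = a3 ∧ '0' = a4 ∧ '4' = a5 then "2012-2013"
  else   if '1' = a0 ∧ '0' = a1 ∧ '0' = a2 ∧ '0' = a3 ∧ '0' = a4 ∧ '5' = a5 then "2013-2014"
  else   if '1' = a0 ∧ '0' = a1 ∧ '0' = a2 ∧ '0' = a3 ∧ '0' = a4 ∧ '7' = a5 then "2014-2015"
  else   if '1' = a0 ∧ '0' = a1 ∧ '0' = a2 ∧ '0' = a3 ∧ '0' = a4 ∧ '9' = a5 then "2015"
  else   if '1' = a0 ∧ '0' = a1 ∧ '0' = a2 ∧ '0' = a3 ∧ '1' = a4 then "2015-2016"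
  else   if '1' = a0 ∧ '0' = a1 ∧ '0' = a2 ∧ '0' = a3 ∧ '2' = a4 then "2016-2017"
  else   if '1' = a0 ∧ '0' = a1 ∧ '0' = a2 ∧ '0' = a3 ∧ '3' = a4 then "2018"
  else   if '1' = a0 ∧ '0' = a1 ∧ '0' = a2 ∧ '0' = a3 ∧ '4' = a4 then "2019"
  else   if '1' = a0 ∧ '0' = a1 ∧ '0' = a2 ∧ '0' = a3 ∧ '5' = a4 then "2020"
  else   if '1' = a0 ∧ '0' = a1 ∧ '0' = a2 ∧ '0' = a3 ∧ '6' = a4 then "2021-2022"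
  else ""

def treeB (a0 a1 a2 a3 a4 a5 a6 : Char) : String :=
  if ¬('1' = a0 ∧ '0' = a1 ∧ '0' = a2 ∧ '0' = a3) then ""
  else if ¬('0' = a4) then
    (if '1' = a4 then "2015-2016" else if '2' = a4 then "2016-2017" else if '3' = a4 then "2018"
     else if '4' = a4 then "2019" else if '5' = a4 then "2020" else if '6' = a4 then "2021-2022"
     else "")
  else if ¬('0' = a5) then
    (if '1' = a5 then "2010-2011" else if '2' = a5 then "2011-2012" else if '4' = a5 then "2012-2013"
     else if '5' = a5 then "2013-2014" else if '7' = a5 then "2014-2015" else if '9' = a5 then "2015"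
     else "")
  else if '0' = a6 then "2009"
  else if '6' = a6 then "2010"
  else ""

-- two single-character strings with distinct characters are not beq-equal
theorem strBeq_single_false (d c : Char) (h : ¬ d = c) :
    ((String.ofList [d] : String) == String.ofList [c]) = false := by
  rw [Bool.eq_iff_iff]
  simp [beq_iff_eq, String.ext_iff, h]

-- single-character string equality reduces to the character equality (key on the left)
theorem ofListc_eq (c d : Char) : (String.ofList [c] = String.ofList [d]) ↔ (d = c) := by
  simp [String.ext_iff, eq_comm]

-- four-character string equality reduces to the four character equalities (keys on the left)
theorem ofList4_eq (a b c d e f g h : Char) :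
    (String.ofList [a, b, c, d] = String.ofList [e, f, g, h]) ↔
      (e = a ∧ f = b ∧ g = c ∧ h = d) := by
  constructor
  · intro hh
    have := congrArg String.toList hh
    simp at this
    exact ⟨this.1.symm, this.2.1.symm, this.2.2.1.symm, this.2.2.2.symm⟩
  · rintro ⟨h1, h2, h3, h4⟩
    subst h1; subst h2; subst h3; subst h4; rfl

-- the year-by-5th-character dictionary lookup as a character decision chain
theorem y4_getD (c : Char) : tahunY4.getD (String.ofList [c]) "" =
    (if '1' = c then "2015-2016" else if '2' = c then "2016-2017" else if '3' = c then "2018"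
     else if '4' = c then "2019" else if '5' = c then "2020" else if '6' = c then "2021-2022"
     else "") := by
  by_cases h1 : '1' = c; · cases h1; decide
  by_cases h2 : '2' = c; · cases h2; decide
  by_cases h3 : '3' = c; · cases h3; decide
  by_cases h4 : '4' = c; · cases h4; decide
  by_cases h5 : '5' = c; · cases h5; decide
  by_cases h6 : '6' = c; · cases h6; decide
  simp only [tahunY4, PySem.Dict.getD, PySem.Dict.get?, List.find?,
    show ("1" : String) = String.ofList ['1'] from by decide,
    show ("2" : String) = String.ofList ['2'] from by decide,
    show ("3" : String) = String.ofList ['3'] from by decide,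
    show ("4" : String) = String.ofList ['4'] from by decide,
    show ("5" : String) = String.ofList ['5'] from by decide,
    show ("6" : String) = String.ofList ['6'] from by decide,
    strBeq_single_false _ _ h1, strBeq_single_false _ _ h2, strBeq_single_false _ _ h3,
    strBeq_single_false _ _ h4, strBeq_single_false _ _ h5, strBeq_single_false _ _ h6]
  simp [h1, h2, h3, h4, h5, h6]

-- the year-by-6th-character dictionary lookup as a character decision chain
theorem y5_getD (c : Char) : tahunY5.getD (String.ofList [c]) "" =
    (if '1' = c then "2010-2011" else if '2' = c then "2011-2012" else if '4' = c then "2012-2013"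
     else if '5' = c then "2013-2014" else if '7' = c then "2014-2015" else if '9' = c then "2015"
     else "") := by
  by_cases h1 : '1' = c; · cases h1; decide
  by_cases h2 : '2' = c; · cases h2; decide
  by_cases h4 : '4' = c; · cases h4; decide
  by_cases h5 : '5' = c; · cases h5; decide
  by_cases h7 : '7' = c; · cases h7; decide
  by_cases h9 : '9' = c; · cases h9; decide
  simp only [tahunY5, PySem.Dict.getD, PySem.Dict.get?, List.find?,
    show ("1" : String) = String.ofList ['1'] from by decide,
    show ("2" : String) = String.ofList ['2'] from by decide,
    show ("4" : String) = String.ofList ['4'] from by decide,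
    show ("5" : String) = String.ofList ['5'] from by decide,
    show ("7" : String) = String.ofList ['7'] from by decide,
    show ("9" : String) = String.ofList ['9'] from by decide,
    strBeq_single_false _ _ h1, strBeq_single_false _ _ h2, strBeq_single_false _ _ h4,
    strBeq_single_false _ _ h5, strBeq_single_false _ _ h7, strBeq_single_false _ _ h9]
  simp [h1, h2, h4, h5, h7, h9]

theorem scanA_eq (a0 a1 a2 a3 a4 a5 a6 a7 a8 a9 a10 a11 a12 a13 a14 : Char) :
    tahunScan (String.ofList [a0,a1,a2,a3,a4,a5,a6,a7,a8,a9,a10,a11,a12,a13,a14]) tahunPrefixMap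
      = treeA a0 a1 a2 a3 a4 a5 a6 a7 a8 a9 := by
  simp only [tahunScan, tahunPrefixMap, treeA]
  rw [show ("1000000000" : String) = String.ofList ['1','0','0','0','0','0','0','0','0','0'] from by decide,
    show ("100000000" : String) = String.ofList ['1','0','0','0','0','0','0','0','0'] from by decide,
    show ("10000000" : String) = String.ofList ['1','0','0','0','0','0','0','0'] from by decide,
    show ("1000000" : String) = String.ofList ['1','0','0','0','0','0','0'] from by decide,
    show ("1000006" : String) = String.ofList ['1','0','0','0','0','0','6'] from by decide,
    show ("100001" : String) = String.ofList ['1','0','0','0','0','1'] from by decide,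
    show ("100002" : String) = String.ofList ['1','0','0','0','0','2'] from by decide,
    show ("100004" : String) = String.ofList ['1','0','0','0','0','4'] from by decide,
    show ("100005" : String) = String.ofList ['1','0','0','0','0','5'] from by decide,
    show ("100007" : String) = String.ofList ['1','0','0','0','0','7'] from by decide,
    show ("100009" : String) = String.ofList ['1','0','0','0','0','9'] from by decide,
    show ("10001" : String) = String.ofList ['1','0','0','0','1'] from by decide,
    show ("10002" : String) = String.ofList ['1','0','0','0','2'] from by decide,
    show ("10003" : String) = String.ofList ['1','0','0','0','3'] from by decide,
    show ("10004" : String) = String.ofList ['1','0','0','0','4'] from by decide,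
    show ("10005" : String) = String.ofList ['1','0','0','0','5'] from by decide,
    show ("10006" : String) = String.ofList ['1','0','0','0','6'] from by decide]
  refine if_congr ?_ rfl (if_congr ?_ rfl (if_congr ?_ rfl (if_congr ?_ rfl (if_congr ?_ rfl (if_congr ?_ rfl (if_congr ?_ rfl (if_congr ?_ rfl (if_congr ?_ rfl (if_congr ?_ rfl (if_congr ?_ rfl (if_congr ?_ rfl (if_congr ?_ rfl (if_congr ?_ rfl (if_congr ?_ rfl (if_congr ?_ rfl (if_congr ?_ rfl rfl))))))))))))))))
  all_goals
    simp [PySem.Str.startswith_eq, String.toList_ofList, PySem.Chars.startswith,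
      List.isPrefixOf, Bool.and_eq_true, beq_iff_eq]

theorem treeB_eq (a0 a1 a2 a3 a4 a5 a6 : Char) :
    (if String.ofList [a0,a1,a2,a3] ≠ String.ofList ['1','0','0','0'] then ""
     else if String.ofList [a4] ≠ String.ofList ['0'] then
       (if '1' = a4 then "2015-2016" else if '2' = a4 then "2016-2017" else if '3' = a4 then "2018"
     else if '4' = a4 then "2019" else if '5' = a4 then "2020" else if '6' = a4 then "2021-2022"
     else "")
     else if String.ofList [a5] ≠ String.ofList ['0'] then
       (if '1' = a5 then "2010-2011" else if '2' = a5 then "2011-2012" else if '4' = a5 then "2012-2013"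
     else if '5' = a5 then "2013-2014" else if '7' = a5 then "2014-2015" else if '9' = a5 then "2015"
     else "")
     else if String.ofList [a6] = String.ofList ['0'] then "2009"
     else if String.ofList [a6] = String.ofList ['6'] then "2010"
     else "")
    = treeB a0 a1 a2 a3 a4 a5 a6 := by
  simp only [treeB]
  exact if_congr (not_congr (ofList4_eq _ _ _ _ _ _ _ _)) rfl
    (if_congr (not_congr (ofListc_eq _ _)) rfl
      (if_congr (not_congr (ofListc_eq _ _)) rfl
        (if_congr (ofListc_eq _ _) rfl (if_congr (ofListc_eq _ _) rfl rfl))))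

set_option maxRecDepth 4096 in
theorem treeAB (a0 a1 a2 a3 a4 a5 a6 a7 a8 a9 : Char) :
    treeA a0 a1 a2 a3 a4 a5 a6 a7 a8 a9 = treeB a0 a1 a2 a3 a4 a5 a6 := by
  simp only [treeA, treeB]
  by_cases h0 : '1' = a0
  · by_cases h1 : '0' = a1
    · by_cases h2 : '0' = a2
      · by_cases h3 : '0' = a3
        · by_cases h4 : '0' = a4
          · by_cases h5 : '0' = a5
            · by_cases h6 : '0' = a6
              · subst_vars; simp [ite_self]
              · by_cases h6' : '6' = a6
                · subst_vars; simp [h6]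
                · subst_vars; simp [h6, h6']
            · by_cases k1 : '1' = a5
              · subst_vars; simp [h5]
              · by_cases k2 : '2' = a5
                · subst_vars; simp [h5, k1]
                · by_cases k4 : '4' = a5
                  · subst_vars; simp [h5, k1, k2]
                  · by_cases k5 : '5' = a5
                    · subst_vars; simp [h5, k1, k2, k4]
                    · by_cases k7 : '7' = a5
                      · subst_vars; simp [h5, k1, k2, k4, k5]
                      · by_cases k9 : '9' = a5
                        · subst_vars; simp [h5, k1, k2, k4, k5, k7]
                        · subst_vars; simp [h5, k1, k2, k4, k5, k7, k9]
          · by_cases k1 : '1' = a4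
            · subst_vars; simp [h4]
            · by_cases k2 : '2' = a4
              · subst_vars; simp [h4, k1]
              · by_cases k3 : '3' = a4
                · subst_vars; simp [h4, k1, k2]
                · by_cases k4 : '4' = a4
                  · subst_vars; simp [h4, k1, k2, k3]
                  · by_cases k5 : '5' = a4
                    · subst_vars; simp [h4, k1, k2, k3, k4]
                    · by_cases k6 : '6' = a4
                      · subst_vars; simp [h4, k1, k2, k3, k4, k5]
                      · subst_vars; simp [h4, k1, k2, k3, k4, k5, k6]
        · subst_vars; simp [h3]
      · subst_vars; simp [h2]
    · subst_vars; simp [h1]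
  · simp [h0]

-- on a 15-character string the two programs agree (prefix scan = character decision tree)
set_option maxRecDepth 4096 in
theorem len15_case (cs : List Char) (h : cs.length = 15) :
    tahun (String.ofList cs) = tahun_alt (String.ofList cs) := by
  have he : ¬ (String.ofList cs = "") := by
    intro hc
    have := congrArg String.toList hc
    simp at this
    rw [this] at h; simp at h
  have h15 : PySem.Str.len (String.ofList cs) = 15 := by
    simp [PySem.Str.len_eq, h]
  unfold tahun tahun_alt
  rw [if_neg he, if_pos h15, if_neg he, if_pos h15]
  rcases cs with _ | ⟨a0, cs⟩; · simp at h
  rcases cs with _ | ⟨a1, cs⟩; · simp at h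
  rcases cs with _ | ⟨a2, cs⟩; · simp at h
  rcases cs with _ | ⟨a3, cs⟩; · simp at h
  rcases cs with _ | ⟨a4, cs⟩; · simp at h
  rcases cs with _ | ⟨a5, cs⟩; · simp at h
  rcases cs with _ | ⟨a6, cs⟩; · simp at h
  rcases cs with _ | ⟨a7, cs⟩; · simp at h
  rcases cs with _ | ⟨a8, cs⟩; · simp at h
  rcases cs with _ | ⟨a9, cs⟩; · simp at h
  rcases cs with _ | ⟨a10, cs⟩; · simp at h
  rcases cs with _ | ⟨a11, cs⟩; · simp at h
  rcases cs with _ | ⟨a12, cs⟩; · simp at h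
  rcases cs with _ | ⟨a13, cs⟩; · simp at h
  rcases cs with _ | ⟨a14, cs⟩; · simp at h
  rcases cs with _ | ⟨a15, cs⟩; swap; · simp at h
  have s04 : PySem.Str.slice (String.ofList [a0,a1,a2,a3,a4,a5,a6,a7,a8,a9,a10,a11,a12,a13,a14]) none (some 4)
      = String.ofList [a0, a1, a2, a3] := by
    simp [PySem.Str.slice, PySem.Chars.slice_eq_listSlice, PySem.List.slice]
  have s45 : PySem.Str.slice (String.ofList [a0,a1,a2,a3,a4,a5,a6,a7,a8,a9,a10,a11,a12,a13,a14]) (some 4) (some 5)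
      = String.ofList [a4] := by
    simp [PySem.Str.slice, PySem.Chars.slice_eq_listSlice, PySem.List.slice]
  have s56 : PySem.Str.slice (String.ofList [a0,a1,a2,a3,a4,a5,a6,a7,a8,a9,a10,a11,a12,a13,a14]) (some 5) (some 6)
      = String.ofList [a5] := by
    simp [PySem.Str.slice, PySem.Chars.slice_eq_listSlice, PySem.List.slice]
  have s67 : PySem.Str.slice (String.ofList [a0,a1,a2,a3,a4,a5,a6,a7,a8,a9,a10,a11,a12,a13,a14]) (some 6) (some 7)
      = String.ofList [a6] := by
    simp [PySem.Str.slice, PySem.Chars.slice_eq_listSlice, PySem.List.slice]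
  rw [s04, s45, s56, s67,
    show ("1000" : String) = String.ofList ['1','0','0','0'] from by decide,
    show ("0" : String) = String.ofList ['0'] from by decide,
    show ("6" : String) = String.ofList ['6'] from by decide,
    y4_getD, y5_getD, treeB_eq, scanA_eq]
  exact treeAB a0 a1 a2 a3 a4 a5 a6 a7 a8 a9

-- ===== VERDICT (by name: the statement is the Claim_ definition above) =====
theorem tahun_spec : Claim_equal_tahun := by
  intro fx _
  unfold Spec_tahun
  by_cases he : fx = ""
  · unfold tahun tahun_alt
    rw [if_pos he, if_pos he]
  · by_cases h15 : PySem.Str.len fx = 15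
    · have h' : fx.toList.length = 15 := by
        have := h15
        rw [PySem.Str.len_eq] at this
        exact_mod_cast this
      rw [show fx = String.ofList fx.toList from (String.ofList_toList (s := fx)).symm]
      exact len15_case fx.toList h'
    · unfold tahun tahun_alt
      rw [if_neg he, if_neg he, if_neg h15, if_neg h15]
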